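-- pv_equiv track=rewrite | github.com/NiklasMelton/AdaptiveResonanceLib | artlib/fusion/FusionART.py | get_channel_position_tuples
-- ===== SOURCE A (Python) =====
-- from typing import Optional, Union, Callable, List, Literal, Tuple, Dict
--
-- def get_channel_position_tuples(
--     channel_dims: List[int],
-- ) -> List[Tuple[int, int]]:
--     """Generate the start and end positions for each channel in the input data.
--
--     Parameters
--     ----------
--     channel_dims : list of int
--         A list representing the number of dimensions for each channel.
--
--     Returns
--     -------
--     list of tuple of int
--         A list of tuples where each tuple represents the start and end index for a
--         channel.
--
--     """
--     positions = []
--     start = 0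
--     for length in channel_dims:
--         end = start + length
--         positions.append((start, end))
--         start = end
--     return positions
-- ===== SOURCE B (Python) =====
-- from typing import List, Tuple
--
-- def get_channel_position_tuples(
--     channel_dims: List[int],
-- ) -> List[Tuple[int, int]]:
--     # Per-index closed form: the i-th channel spans from the sum of all
--     # preceding dims to that sum plus its own dim.
--     return [
--         (sum(channel_dims[:i]), sum(channel_dims[:i + 1]))
--         for i in range(len(channel_dims))
--     ]
-- ===== Notes on version B (the rewrite author's own statement) =====
-- stated objective: alternative
-- what changed: Replaces the single-pass running-start accumulator loop by a per-index closed form that recomputes each boundary independently as sum(channel_dims[:i]) and sum(channel_dims[:i+1]), trading the threaded state for O(n^2) independent slice sums.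
import Mathlib
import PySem

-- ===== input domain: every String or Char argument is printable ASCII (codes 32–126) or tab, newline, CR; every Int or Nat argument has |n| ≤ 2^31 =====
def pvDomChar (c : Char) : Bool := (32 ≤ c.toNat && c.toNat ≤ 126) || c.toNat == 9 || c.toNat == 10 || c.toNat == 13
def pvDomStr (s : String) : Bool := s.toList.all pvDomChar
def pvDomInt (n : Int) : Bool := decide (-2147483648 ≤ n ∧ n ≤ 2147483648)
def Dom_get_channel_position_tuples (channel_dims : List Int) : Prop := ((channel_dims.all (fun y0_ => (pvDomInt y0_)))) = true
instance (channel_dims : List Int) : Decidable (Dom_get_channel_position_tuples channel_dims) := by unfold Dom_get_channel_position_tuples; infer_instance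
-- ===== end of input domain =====

-- B replaces A's running-start append loop by a per-index closed form (each boundary recomputed as a prefix-slice sum); objective: alternative, O(n^2) vs A's O(n).


-- ===== PORT A =====
-- loop: positions = []; start = 0; for length: end = start+length; append (start,end); start = end
def get_channel_position_tuples (channel_dims : List Int) : List (Int × Int) :=
  (channel_dims.foldl
    (fun (st : List (Int × Int) × Int) (length : Int) =>
      let e := st.2 + length
      (st.1 ++ [(st.2, e)], e))
    ([], 0)).1

-- ===== PORT B =====
-- B: [(sum(d[:i]), sum(d[:i+1])) for i in range(len(d))]  (d[:i] with 0 ≤ i is List.take i)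
def get_channel_position_tuples_alt (channel_dims : List Int) : List (Int × Int) :=
  (List.range channel_dims.length).map
    (fun i => ((channel_dims.take i).sum, (channel_dims.take (i + 1)).sum))

-- ===== PRECONDITION & SPEC =====
def Spec_get_channel_position_tuples (channel_dims : List Int) (out : List (Int × Int)) : Prop := out = get_channel_position_tuples_alt channel_dims
instance (channel_dims : List Int) (out : List (Int × Int)) : Decidable (Spec_get_channel_position_tuples channel_dims out) := by unfold Spec_get_channel_position_tuples; infer_instance

-- ===== CLAIM =====
def Claim_equal_get_channel_position_tuples : Prop := ∀ (channel_dims : List Int), Dom_get_channel_position_tuples channel_dims → Spec_get_channel_position_tuples channel_dims (get_channel_position_tuples channel_dims)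

-- ===== LEMMAS AND PROOFS =====
-- loop invariant: folding from (acc, s) yields acc ++ the per-index prefix-sum pairs shifted by s
theorem gcpt_fold_eq (cd : List Int) (acc : List (Int × Int)) (s : Int) :
    (cd.foldl
      (fun (st : List (Int × Int) × Int) (length : Int) =>
        let e := st.2 + length
        (st.1 ++ [(st.2, e)], e))
      (acc, s)).1
    = acc ++ (List.range cd.length).map
        (fun i => (s + (cd.take i).sum, s + (cd.take (i + 1)).sum)) := by
  induction cd generalizing acc s with
  | nil => simp
  | cons d rest ih =>
      simp only [List.foldl_cons]
      rw [ih]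
      rw [List.length_cons, List.range_succ_eq_map]
      simp [List.map_map, Function.comp_def, List.take_succ_cons, add_assoc]

-- ===== VERDICT =====
theorem get_channel_position_tuples_spec : Claim_equal_get_channel_position_tuples := by
  intro cd _
  unfold Spec_get_channel_position_tuples get_channel_position_tuples get_channel_position_tuples_alt
  simpa using gcpt_fold_eq cd [] 0
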